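-- pv_equiv track=rewrite | github.com/linhdvu14/cp-sols | sols/CodeForces/2111_edu/D_Creating_a_Schedule.py | solve
-- ===== SOURCE A (Python) =====
-- def solve(N, M, A):
--     A.sort(key=lambda a: a // 100)
--
--     if N == 1: return [[A[0], A[-1]] * 3]
--
--     res = [[0] * 6 for _ in range(N)]
--     for c in range(6):
--         for i in range(N // 2):
--             res[i][c] = A[i] if c % 2 else A[-1 - i]
--             res[-1 - i][c] = A[-1 - i] if c % 2 else A[i]
--         if N % 2:
--             res[N // 2][c] = A[N // 2] if c % 2 else A[-1 - N // 2]
--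
--     return res
-- ===== SOURCE B (Python) =====
-- def solve(N, M, A):
--     A.sort(key=lambda a: a // 100)
--
--     if N == 1: return [[A[0], A[-1]] * 3]
--
--     L = len(A)
--     front, back = [], []
--     i, j = 0, N - 1
--     while i < j:
--         front.append([A[L - 1 - i], A[i]] * 3)
--         back.append([A[i], A[L - 1 - i]] * 3)
--         i += 1
--         j -= 1
--     if i == j:
--         front.append([A[L - 1 - i], A[i]] * 3)
--     back.reverse()
--     return front + back
-- ===== Notes on version B (the rewrite author's own statement) =====
-- stated objective: alternative
-- what changed: A allocates a zero N x 6 matrix and fills it cell by cell, column-major, with nested 6 x (N//2) loops, a c%2 branch and a middle-row case; B has no matrix and no column loop: a two-pointer sweep from both ends emits each strongest-vs-weakest pair's full row into a front and a back accumulator, handles an odd middle row once, and concatenates front with the reversed back.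
import Mathlib
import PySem

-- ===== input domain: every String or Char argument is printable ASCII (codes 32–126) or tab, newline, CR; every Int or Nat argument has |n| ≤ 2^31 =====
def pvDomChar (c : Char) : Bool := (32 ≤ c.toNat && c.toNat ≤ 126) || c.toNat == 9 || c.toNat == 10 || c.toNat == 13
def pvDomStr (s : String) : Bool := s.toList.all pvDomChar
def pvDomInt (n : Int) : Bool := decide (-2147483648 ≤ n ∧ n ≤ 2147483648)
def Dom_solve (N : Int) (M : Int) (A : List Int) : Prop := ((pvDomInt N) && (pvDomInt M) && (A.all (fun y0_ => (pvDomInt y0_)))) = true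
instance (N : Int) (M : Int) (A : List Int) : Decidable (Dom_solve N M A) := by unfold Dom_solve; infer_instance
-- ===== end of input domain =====

-- B replaces A's column-major fill (zero matrix, nested 6×(N//2) loops, c%2 branch, middle-row
-- case) by a two-pointer outside-in sweep: it emits each strongest-vs-weakest pair's full row
-- into a front and a back accumulator, handles an odd middle row once, and returns
-- front ++ back.reverse; no matrix and no column loop.  Objective: alternative.  Both Pythons
-- sort A in place; the proved equivalence is about the return value (the mutation of A is
-- identical in both).

-- ===== PORT A =====
def sortKey (a : Int) : Int := PySem.Int.floordiv a 100

-- res[i][c] = v : fetch row i, set its column c, store the row back (exact on in-range indices)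
def setRC (res : List (List Int)) (i : Int) (c : Int) (v : Int) : List (List Int) :=
  PySem.List.pySetD res i (PySem.List.pySetD (PySem.List.pyGetD res i []) c v)

-- body of 'for i in range(N // 2)'
def innerBody (s : List Int) (c : Int) (res : List (List Int)) (i : Int) : List (List Int) :=
  let res := setRC res i c
    (if PySem.Int.mod c 2 ≠ 0 then PySem.List.pyGetD s i 0 else PySem.List.pyGetD s (-1 - i) 0)
  setRC res (-1 - i) c
    (if PySem.Int.mod c 2 ≠ 0 then PySem.List.pyGetD s (-1 - i) 0 else PySem.List.pyGetD s i 0)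

-- body of 'for c in range(6)'
def colBody (s : List Int) (N : Int) (res : List (List Int)) (c : Int) : List (List Int) :=
  let res := (PySem.List.pyRange 0 (PySem.Int.floordiv N 2) 1).foldl (innerBody s c) res
  if PySem.Int.mod N 2 ≠ 0 then
    setRC res (PySem.Int.floordiv N 2) c
      (if PySem.Int.mod c 2 ≠ 0 then PySem.List.pyGetD s (PySem.Int.floordiv N 2) 0
       else PySem.List.pyGetD s (-1 - PySem.Int.floordiv N 2) 0)
  else res

def solve (N : Int) (M : Int) (A : List Int) : List (List Int) :=
  let s := PySem.List.sorted A sortKey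
  if N == 1 then
    let p := [PySem.List.pyGetD s 0 0, PySem.List.pyGetD s (-1) 0]
    [p ++ p ++ p]
  else
    (PySem.List.pyRange 0 6 1).foldl (colBody s N)
      ((PySem.List.pyRange 0 N 1).map (fun _ => List.replicate 6 (0 : Int)))

-- ===== PORT B =====
-- the 'while i < j' two-pointer loop, then the odd middle row, then front + reversed back
def wrapLoop (s : List Int) (L : Int) (i : Int) (j : Int)
    (front : List (List Int)) (back : List (List Int)) : List (List Int) :=
  if i < j then
    let p := [PySem.List.pyGetD s (L - 1 - i) 0, PySem.List.pyGetD s i 0]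
    let q := [PySem.List.pyGetD s i 0, PySem.List.pyGetD s (L - 1 - i) 0]
    wrapLoop s L (i + 1) (j - 1) (front ++ [p ++ p ++ p]) (back ++ [q ++ q ++ q])
  else
    let front := if i == j then
        let p := [PySem.List.pyGetD s (L - 1 - i) 0, PySem.List.pyGetD s i 0]
        front ++ [p ++ p ++ p]
      else front
    front ++ back.reverse
termination_by (j - i).toNat
decreasing_by omega

def solve_alt (N : Int) (M : Int) (A : List Int) : List (List Int) :=
  let s := PySem.List.sorted A sortKey
  if N == 1 then
    let p := [PySem.List.pyGetD s 0 0, PySem.List.pyGetD s (-1) 0]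
    [p ++ p ++ p]
  else
    wrapLoop s (s.length : Int) 0 (N - 1) [] []

-- ===== PRECONDITION & SPEC =====
-- Pre_solve is exactly the set of inputs on which the Python A returns normally (everywhere else
-- it raises IndexError): N == 1 with a nonempty list, N ≤ 0 even (empty schedule), or
-- 2 ≤ N ≤ 2*len(A).
def Pre_solve (N : Int) (M : Int) (A : List Int) : Prop :=
  (N = 1 ∧ A ≠ []) ∨ (N ≤ 0 ∧ N % 2 = 0) ∨ (2 ≤ N ∧ N ≤ 2 * (A.length : Int))
instance (N : Int) (M : Int) (A : List Int) : Decidable (Pre_solve N M A) := by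
  unfold Pre_solve; infer_instance

def pvWitness_solve : Int × Int × List Int := (3, 6, [150, 20, 301])

def Spec_solve (N : Int) (M : Int) (A : List Int) (out : List (List Int)) : Prop :=
  out = solve_alt N M A
instance (N : Int) (M : Int) (A : List Int) (out : List (List Int)) :
    Decidable (Spec_solve N M A out) := by unfold Spec_solve; infer_instance

-- ===== CLAIM (what is proved, stated in full; the proofs are below) =====
def Claim_equal_solve : Prop := ∀ (N : Int) (M : Int) (A : List Int),
  Dom_solve N M A → Pre_solve N M A → Spec_solve N M A (solve N M A)

-- ===== LEMMAS AND PROOFS =====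

-- value written by A into row j (of n rows) at column c; s = sorted list, L = its length
def evenVal (s : List Int) (L n j : Nat) : Int :=
  if j < n / 2 then s.getD (L - 1 - j) 0
  else if n - n / 2 ≤ j then s.getD (n - 1 - j) 0
  else s.getD (L - 1 - n / 2) 0

def oddVal (s : List Int) (L n j : Nat) : Int :=
  if j < n / 2 then s.getD j 0
  else if n - n / 2 ≤ j then s.getD (L - 1 - (n - 1 - j)) 0
  else s.getD (n / 2) 0

def rowVal (s : List Int) (L n : Nat) (c : Int) (j : Nat) : Int :=
  if PySem.Int.mod c 2 ≠ 0 then oddVal s L n j else evenVal s L n j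

theorem pySetD_neg {α : Type} (xs : List α) (k : Nat) (v : α) (h1 : 0 < k)
    (h2 : k ≤ xs.length) :
    PySem.List.pySetD xs (-(k : Int)) v = xs.set (xs.length - k) v := by
  have hk1 : -((xs.length:Int)) ≤ -(k:Int) := by omega
  have hk2 : k ≠ 0 := by omega
  simp [PySem.List.pySetD, PySem.List.pySet?, PySem.List.pyIdx?, hk1, hk2]

theorem pyGetD_neg1sub (s : List Int) (k : Nat) (hk : k < s.length) :
    PySem.List.pyGetD s (-1 - (k : Int)) 0 = s.getD (s.length - 1 - k) 0 := by
  have h : (-1 - (k:Int)) = -((k+1 : Nat) : Int) := by push_cast; ring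
  rw [h, PySem.List.pyGetD_neg_natCast s (k+1) 0 (by omega) (by omega)]
  have h2 : s.length - 1 - k = s.length - (k+1) := by omega
  rw [h2, List.getD_eq_getElem _ _ (by omega)]

theorem set_map_range {α : Type} (g : Nat → α) (n k : Nat) (v : α) :
    (List.map g (List.range n)).set k v
      = List.map (fun j => if j = k then v else g j) (List.range n) := by
  apply List.ext_getElem
  · simp
  · intro i h1 h2
    simp only [List.getElem_set, List.getElem_map, List.getElem_range]
    rcases eq_or_ne i k with h | h
    · simp [h]
    · simp [h, Ne.symm h]

theorem setRC_map_range_pos (g : Nat → List Int) (n k : Nat) (hk : k < n) (c : Int) (v : Int) :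
    setRC (List.map g (List.range n)) (k : Int) c v
      = List.map (fun j => if j = k then PySem.List.pySetD (g k) c v else g j)
          (List.range n) := by
  unfold setRC
  rw [PySem.List.pyGetD_natCast, PySem.List.getD_map_range g n k [] hk,
      PySem.List.pySetD_natCast, set_map_range]

theorem setRC_map_range_neg (g : Nat → List Int) (n k : Nat) (hk : k < n) (c : Int) (v : Int) :
    setRC (List.map g (List.range n)) (-1 - (k : Int)) c v
      = List.map (fun j => if j = n - 1 - k then PySem.List.pySetD (g (n - 1 - k)) c v else g j)
          (List.range n) := by
  unfold setRC
  have h : (-1 - (k:Int)) = -((k+1 : Nat) : Int) := by push_cast; ring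
  have hlen : (List.map g (List.range n)).length = n := by simp
  rw [h, PySem.List.pyGetD_neg_natCast _ (k+1) [] (by omega) (by omega),
      pySetD_neg _ (k+1) _ (by omega) (by omega)]
  have h2 : n - (k+1) = n - 1 - k := by omega
  simp only [List.length_map, List.length_range, List.getElem_map, List.getElem_range, h2]
  rw [set_map_range]

theorem innerLoop (s : List Int) (L n : Nat) (hs : s.length = L) (hn : 2 ≤ n)
    (hL : n ≤ 2 * L) (c : Int) (m : Nat) (hm : m ≤ n / 2) (g : Nat → List Int) :
    (List.range m).foldl (fun res (k : Nat) => innerBody s c res (k : Int))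
        (List.map g (List.range n))
      = List.map (fun j => if j < m ∨ n - m ≤ j
          then PySem.List.pySetD (g j) c (rowVal s L n c j) else g j) (List.range n) := by
  induction m with
  | zero =>
    simp only [List.range_zero, List.foldl_nil]
    refine (List.map_congr_left ?_).symm
    intro j hj
    rw [List.mem_range] at hj
    have : ¬ (j < 0 ∨ n - 0 ≤ j) := by omega
    rw [if_neg this]
  | succ m ih =>
    rw [List.range_succ, List.foldl_append, List.foldl_cons, List.foldl_nil, ih (by omega)]
    have hv1 : (if PySem.Int.mod c 2 ≠ 0 then PySem.List.pyGetD s (m : Int) 0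
        else PySem.List.pyGetD s (-1 - (m : Int)) 0) = rowVal s L n c m := by
      unfold rowVal oddVal evenVal
      by_cases hc : PySem.Int.mod c 2 ≠ 0
      · rw [if_pos hc, if_pos hc, if_pos (show m < n / 2 by omega),
          PySem.List.pyGetD_natCast]
      · rw [if_neg hc, if_neg hc, if_pos (show m < n / 2 by omega),
          pyGetD_neg1sub s m (by omega), hs]
    have hv2 : (if PySem.Int.mod c 2 ≠ 0 then PySem.List.pyGetD s (-1 - (m : Int)) 0
        else PySem.List.pyGetD s (m : Int) 0) = rowVal s L n c (n - 1 - m) := by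
      unfold rowVal oddVal evenVal
      have c1 : ¬ (n - 1 - m < n / 2) := by omega
      have c2 : n - n / 2 ≤ n - 1 - m := by omega
      have c4 : n - 1 - (n - 1 - m) = m := by omega
      by_cases hc : PySem.Int.mod c 2 ≠ 0
      · rw [if_pos hc, if_pos hc, if_neg c1, if_pos c2, c4,
          pyGetD_neg1sub s m (by omega), hs]
      · rw [if_neg hc, if_neg hc, if_neg c1, if_pos c2, c4, PySem.List.pyGetD_natCast]
    show innerBody s c _ _ = _
    unfold innerBody
    rw [hv1, hv2]
    rw [setRC_map_range_pos _ n m (by omega) c _]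
    rw [setRC_map_range_neg _ n m (by omega) c _]
    apply List.map_congr_left
    intro j hj
    rw [List.mem_range] at hj
    have e1 : ¬ (m < m ∨ n - m ≤ m) := by omega
    have e2 : ¬ (n - 1 - m < m ∨ n - m ≤ n - 1 - m) := by omega
    have e3 : ¬ (n - 1 - m = m) := by omega
    by_cases h1 : j = n - 1 - m
    · subst h1
      rw [if_pos rfl, if_neg e3, if_neg e2,
        if_pos (show n - 1 - m < m + 1 ∨ n - (m + 1) ≤ n - 1 - m by omega)]
    · rw [if_neg h1]
      by_cases h2 : j = m
      · rw [if_pos h2, h2, if_neg e1, if_pos (show m < m + 1 ∨ n - (m + 1) ≤ m by omega)]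
      · rw [if_neg h2]
        by_cases hc : j < m ∨ n - m ≤ j
        · rw [if_pos hc, if_pos (show j < m + 1 ∨ n - (m + 1) ≤ j by omega)]
        · rw [if_neg hc, if_neg (show ¬ (j < m + 1 ∨ n - (m + 1) ≤ j) by omega)]

theorem colStep (s : List Int) (L n : Nat) (hs : s.length = L) (hn : 2 ≤ n)
    (hL : n ≤ 2 * L) (c : Int) (g : Nat → List Int) :
    colBody s (n : Int) (List.map g (List.range n)) c
      = List.map (fun j => PySem.List.pySetD (g j) c (rowVal s L n c j)) (List.range n) := by
  have hflo : PySem.Int.floordiv (n : Int) 2 = ((n / 2 : Nat) : Int) := by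
    exact_mod_cast PySem.Int.floordiv_natCast n 2
  have hmod : PySem.Int.mod (n : Int) 2 = ((n % 2 : Nat) : Int) := by
    exact_mod_cast PySem.Int.mod_natCast n 2
  unfold colBody
  rw [hflo, hmod, PySem.List.pyRange_zero_natCast, List.foldl_map,
    innerLoop s L n hs hn hL c (n / 2) (by omega) g]
  by_cases hpar : n % 2 = 1
  · rw [if_pos (show ((n % 2 : Nat) : Int) ≠ 0 by rw [hpar]; norm_num)]
    have hv : (if PySem.Int.mod c 2 ≠ 0 then PySem.List.pyGetD s ((n / 2 : Nat) : Int) 0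
        else PySem.List.pyGetD s (-1 - ((n / 2 : Nat) : Int)) 0) = rowVal s L n c (n / 2) := by
      unfold rowVal oddVal evenVal
      have c1 : ¬ (n / 2 < n / 2) := by omega
      have c2 : ¬ (n - n / 2 ≤ n / 2) := by omega
      by_cases hc : PySem.Int.mod c 2 ≠ 0
      · rw [if_pos hc, if_pos hc, if_neg c1, if_neg c2, PySem.List.pyGetD_natCast]
      · rw [if_neg hc, if_neg hc, if_neg c1, if_neg c2,
          pyGetD_neg1sub s (n / 2) (by omega), hs]
    rw [hv, setRC_map_range_pos _ n (n / 2) (by omega) c _]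
    have emid : ¬ (n / 2 < n / 2 ∨ n - n / 2 ≤ n / 2) := by omega
    rw [if_neg emid]
    apply List.map_congr_left
    intro j hj
    rw [List.mem_range] at hj
    by_cases h1 : j = n / 2
    · rw [if_pos h1, h1]
    · rw [if_neg h1, if_pos (show j < n / 2 ∨ n - n / 2 ≤ j by omega)]
  · rw [if_neg (show ¬ ((n % 2 : Nat) : Int) ≠ 0 by
      have h0 : n % 2 = 0 := by omega
      rw [h0]; norm_num)]
    apply List.map_congr_left
    intro j hj
    rw [List.mem_range] at hj
    rw [if_pos (show j < n / 2 ∨ n - n / 2 ≤ j by omega)]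

theorem colFold (s : List Int) (L n : Nat) (hs : s.length = L) (hn : 2 ≤ n)
    (hL : n ≤ 2 * L) (cs : List Int) (g : Nat → List Int) :
    cs.foldl (colBody s (n : Int)) (List.map g (List.range n))
      = List.map (fun j =>
          cs.foldl (fun row c => PySem.List.pySetD row c (rowVal s L n c j)) (g j))
          (List.range n) := by
  induction cs generalizing g with
  | nil => simp
  | cons c cs ih =>
    rw [List.foldl_cons, colStep s L n hs hn hL c g, ih]
    simp only [List.foldl_cons]

theorem rowEval (v : Int → Int) :
    List.foldl (fun row c => PySem.List.pySetD row c (v c))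
      (List.replicate 6 (0 : Int)) [0, 1, 2, 3, 4, 5]
    = [v 0, v 1, v 2, v 3, v 4, v 5] := by
  simp only [List.foldl_cons, List.foldl_nil]
  rfl

theorem rowVal_even (s : List Int) (L n : Nat) (c : Int) (hc : PySem.Int.mod c 2 = 0)
    (j : Nat) : rowVal s L n c j = evenVal s L n j := by
  unfold rowVal
  rw [if_neg (by rw [hc]; norm_num)]

theorem rowVal_odd (s : List Int) (L n : Nat) (c : Int) (hc : PySem.Int.mod c 2 = 1)
    (j : Nat) : rowVal s L n c j = oddVal s L n j := by
  unfold rowVal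
  rw [if_pos (by rw [hc]; norm_num)]

def rowFun (s : List Int) (L n : Nat) (j : Nat) : List Int :=
  [evenVal s L n j, oddVal s L n j, evenVal s L n j, oddVal s L n j,
   evenVal s L n j, oddVal s L n j]

theorem A_general (s : List Int) (L n : Nat) (hs : s.length = L) (hn : 2 ≤ n)
    (hL : n ≤ 2 * L) :
    (PySem.List.pyRange 0 6 1).foldl (colBody s (n : Int))
        ((PySem.List.pyRange 0 (n : Int) 1).map (fun _ => List.replicate 6 (0 : Int)))
      = List.map (rowFun s L n) (List.range n) := by
  rw [PySem.List.pyRange_zero_natCast, List.map_map,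
    colFold s L n hs hn hL (PySem.List.pyRange 0 6 1) _,
    show PySem.List.pyRange 0 6 1 = [0, 1, 2, 3, 4, 5] from rfl]
  apply List.map_congr_left
  intro j hj
  rw [Function.comp_apply, rowEval (fun c => rowVal s L n c j)]
  rw [rowVal_even s L n 0 rfl, rowVal_odd s L n 1 rfl, rowVal_even s L n 2 rfl,
    rowVal_odd s L n 3 rfl, rowVal_even s L n 4 rfl, rowVal_odd s L n 5 rfl]
  rfl

-- B's two-pointer loop appends exactly rows i … n-1-i of A's schedule between front and back
theorem wrap_eq (s : List Int) (L n : Nat) (hs : s.length = L) (hn : 2 ≤ n)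
    (hL : n ≤ 2 * L) (hodd : n % 2 = 1 → n ≤ 2 * L - 1) (i : Nat)
    (front back : List (List Int)) :
    wrapLoop s (L : Int) (i : Int) ((n : Int) - 1 - (i : Int)) front back
      = front ++ List.map (rowFun s L n) (List.range' i (n - 2 * i)) ++ back.reverse := by
  by_cases hlt : 2 * i + 1 < n
  · have hrec := wrap_eq s L n hs hn hL hodd (i + 1)
    have hiL : i < L := by omega
    have hgi : PySem.List.pyGetD s ((i : Nat) : Int) 0 = s.getD i 0 :=
      PySem.List.pyGetD_natCast ..
    have hgLi : PySem.List.pyGetD s ((L : Int) - 1 - (i : Int)) 0 = s.getD (L - 1 - i) 0 := by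
      have h1 : ((L : Int) - 1 - (i : Int)) = ((L - 1 - i : Nat) : Int) := by omega
      rw [h1, PySem.List.pyGetD_natCast]
    rw [wrapLoop, if_pos (by omega), hgi, hgLi,
      show ((i : Int) + 1) = (((i + 1 : Nat)) : Int) by push_cast; ring,
      show ((n : Int) - 1 - (i : Int) - 1) = ((n : Int) - 1 - ((i + 1 : Nat) : Int)) by
        push_cast; ring,
      hrec (front ++ _) (back ++ _)]
    have hsplit : List.range' i (n - 2 * i)
        = i :: (List.range' (i + 1) (n - 2 * (i + 1)) ++ [n - 1 - i]) := by
      have h1 : n - 2 * i = (n - 2 * (i + 1)) + 1 + 1 := by omega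
      rw [h1, List.range'_succ, List.range'_concat,
        show (i + 1) + 1 * (n - 2 * (i + 1)) = n - 1 - i by omega]
    have hitop : i < n / 2 := by omega
    have hjbot : ¬ (n - 1 - i < n / 2) ∧ n - n / 2 ≤ n - 1 - i := by omega
    have htop : rowFun s L n i
        = [s.getD (L - 1 - i) 0, s.getD i 0, s.getD (L - 1 - i) 0, s.getD i 0,
           s.getD (L - 1 - i) 0, s.getD i 0] := by
      unfold rowFun evenVal oddVal
      rw [if_pos hitop, if_pos hitop]
    have hbot : rowFun s L n (n - 1 - i)
        = [s.getD i 0, s.getD (L - 1 - i) 0, s.getD i 0, s.getD (L - 1 - i) 0,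
           s.getD i 0, s.getD (L - 1 - i) 0] := by
      unfold rowFun evenVal oddVal
      rw [if_neg hjbot.1, if_neg hjbot.1, if_pos hjbot.2, if_pos hjbot.2,
        show n - 1 - (n - 1 - i) = i by omega]
    rw [hsplit]
    simp only [List.map_cons, List.map_append, List.map_nil, htop, hbot,
      List.reverse_append, List.reverse_cons, List.reverse_nil, List.nil_append,
      List.append_assoc, List.cons_append]
  · by_cases hmid : 2 * i = n - 1
    · have hodd' : n % 2 = 1 := by omega
      have hiL2 : i ≤ L - 1 := by have := hodd hodd'; omega
      have hgi : PySem.List.pyGetD s ((i : Nat) : Int) 0 = s.getD i 0 :=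
        PySem.List.pyGetD_natCast ..
      have hgLi : PySem.List.pyGetD s ((L : Int) - 1 - (i : Int)) 0 = s.getD (L - 1 - i) 0 := by
        have h1 : ((L : Int) - 1 - (i : Int)) = ((L - 1 - i : Nat) : Int) := by omega
        rw [h1, PySem.List.pyGetD_natCast]
      rw [wrapLoop, if_neg (by omega),
        if_pos (show ((i : Int) == (n : Int) - 1 - (i : Int)) = true by simp; omega),
        hgi, hgLi, show n - 2 * i = 1 by omega]
      have hi2 : i = n / 2 := by omega
      have hmidrow : rowFun s L n i
          = [s.getD (L - 1 - i) 0, s.getD i 0, s.getD (L - 1 - i) 0, s.getD i 0,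
             s.getD (L - 1 - i) 0, s.getD i 0] := by
        unfold rowFun evenVal oddVal
        rw [if_neg (show ¬ i < n / 2 by omega), if_neg (show ¬ i < n / 2 by omega),
          if_neg (show ¬ n - n / 2 ≤ i by omega), if_neg (show ¬ n - n / 2 ≤ i by omega), hi2]
      simp only [List.range'_one, List.map_cons, List.map_nil, hmidrow,
        List.append_assoc, List.cons_append, List.nil_append]
    · rw [wrapLoop, if_neg (by omega),
        if_neg (show ¬ ((i : Int) == (n : Int) - 1 - (i : Int)) = true by simp; omega),
        show n - 2 * i = 0 by omega]
      simp
termination_by (n - 2 * i)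
decreasing_by omega

-- ===== VERDICT (by name: the statement is the Claim_ definition above) =====
theorem solve_spec : Claim_equal_solve := by
  unfold Claim_equal_solve
  intro N M A _ hpre
  unfold Spec_solve
  unfold Pre_solve at hpre
  have hslen : (PySem.List.sorted A sortKey).length = A.length :=
    PySem.List.length_sorted A sortKey false
  rcases hpre with ⟨h1, -⟩ | ⟨hle, heven⟩ | ⟨h2, hbound⟩
  · -- N == 1 : both programs take the identical special-case branch
    subst h1
    simp only [solve, solve_alt, show ((1:Int) == 1) = true from rfl, if_true]
  · -- N ≤ 0 and even : both programs return []
    have hne : ((N : Int) == 1) = false := by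
      simp only [beq_eq_false_iff_ne, ne_eq]
      omega
    have hflo : PySem.Int.floordiv N 2 ≤ 0 := by
      rw [PySem.Int.floordiv_eq_ediv_of_pos (by norm_num)]
      omega
    have hmod : PySem.Int.mod N 2 = 0 := by
      rw [PySem.Int.mod_eq_emod_of_pos (by norm_num)]
      omega
    have hr1 : PySem.List.pyRange 0 N 1 = [] := PySem.List.pyRange_one_eq_nil (by omega)
    have hr2 : PySem.List.pyRange 0 (PySem.Int.floordiv N 2) 1 = [] :=
      PySem.List.pyRange_one_eq_nil (by omega)
    have hcol : ∀ c : Int, colBody (PySem.List.sorted A sortKey) N [] c = [] := by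
      intro c
      unfold colBody
      rw [hr2, List.foldl_nil, if_neg (by rw [hmod]; norm_num)]
    have hwrap : wrapLoop (PySem.List.sorted A sortKey)
        ((PySem.List.sorted A sortKey).length : Int) 0 (N - 1) [] [] = [] := by
      rw [wrapLoop, if_neg (by omega),
        if_neg (show ¬ ((0 : Int) == N - 1) = true by simp; omega)]
      rfl
    simp only [solve, solve_alt, hne, Bool.false_eq_true, if_false, hr1, hwrap,
      List.map_nil]
    rw [show PySem.List.pyRange 0 6 1 = [0, 1, 2, 3, 4, 5] from rfl]
    simp only [List.foldl_cons, List.foldl_nil, hcol]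
  · -- 2 ≤ N ≤ 2*len(A) : the general schedule
    lift N to Nat using (by omega) with n
    have hn : 2 ≤ n := by exact_mod_cast h2
    have hL : n ≤ 2 * A.length := by exact_mod_cast hbound
    have hodd : n % 2 = 1 → n ≤ 2 * A.length - 1 := by omega
    have hne : (((n : Nat) : Int) == 1) = false := by
      simp only [beq_eq_false_iff_ne, ne_eq]
      omega
    simp only [solve, solve_alt, hne, Bool.false_eq_true, if_false]
    have hw := wrap_eq (PySem.List.sorted A sortKey) A.length n hslen hn hL hodd 0 [] []
    rw [Nat.cast_zero, Nat.mul_zero, Nat.sub_zero, ← List.range_eq_range', sub_zero,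
      List.reverse_nil, List.nil_append, List.append_nil] at hw
    rw [A_general (PySem.List.sorted A sortKey) A.length n hslen hn hL, hslen, hw]
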